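-- pv_equiv track=rewrite | github.com/samjonescode/Algorithms-and-DataStrucs | Python/word-cloud.py | createCloud
-- ===== SOURCE A (Python) =====
-- def createCloud(cleanedPhrase):
--     cloud = {}
--     for word in cleanedPhrase:
--         if word in cloud:
--             cloud[word] += 1
--         else:
--             cloud[word] = 1
--     return cloud
-- ===== SOURCE B (Python) =====
-- def createCloud(cleanedPhrase):
--     # Different decomposition: dedupe first (first-occurrence order), then one
--     # counting scan per distinct word; no running dict is accumulated.
--     return {word: cleanedPhrase.count(word) for word in dict.fromkeys(cleanedPhrase)}
-- ===== Notes on version B (the rewrite author's own statement) =====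
-- stated objective: alternative
-- what changed: Replaces the single-pass dict accumulation with a dict comprehension over the deduplicated words, counting each distinct word with list.count (repeated-scan strategy, no running dict).
import Mathlib
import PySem

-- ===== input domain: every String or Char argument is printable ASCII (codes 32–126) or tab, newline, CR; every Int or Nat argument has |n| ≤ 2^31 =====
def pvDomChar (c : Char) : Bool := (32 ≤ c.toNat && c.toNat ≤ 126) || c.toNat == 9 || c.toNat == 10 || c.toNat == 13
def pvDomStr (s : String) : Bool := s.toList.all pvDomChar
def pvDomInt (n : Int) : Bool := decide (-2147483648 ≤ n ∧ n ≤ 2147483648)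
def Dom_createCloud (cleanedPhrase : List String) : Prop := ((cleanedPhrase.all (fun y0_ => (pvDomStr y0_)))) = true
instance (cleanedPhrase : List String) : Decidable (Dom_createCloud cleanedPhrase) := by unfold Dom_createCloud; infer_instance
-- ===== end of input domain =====

-- B replaces A's running-dict accumulation by a map over the deduplicated words,
-- counting each distinct word with a separate scan (alternative decomposition, not faster).

-- ===== PORT A =====
-- A: loop over words, membership test, += 1 or = 1 on a dict.
def createCloud (cleanedPhrase : List String) : List (String × Int) :=
  (cleanedPhrase.foldl
    (fun cloud word =>
      if cloud.contains word then cloud.insert word (cloud.getD word 0 + 1)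
      else cloud.insert word 1)
    PySem.Dict.empty).items

-- ===== PORT B =====
-- B: dict comprehension over dict.fromkeys(cleanedPhrase) with cleanedPhrase.count(word).
def createCloud_alt (cleanedPhrase : List String) : List (String × Int) :=
  (PySem.List.dedup cleanedPhrase).map
    (fun word => (word, (PySem.List.count cleanedPhrase word : Int)))

-- ===== PRECONDITION & SPEC =====
def Spec_createCloud (cleanedPhrase : List String) (out : List (String × Int)) : Prop := out = createCloud_alt cleanedPhrase
instance (cleanedPhrase : List String) (out : List (String × Int)) : Decidable (Spec_createCloud cleanedPhrase out) := by unfold Spec_createCloud; infer_instance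

-- ===== CLAIM (what is proved, stated in full; the proofs are below) =====
def Claim_equal_createCloud : Prop := ∀ (cleanedPhrase : List String), Dom_createCloud cleanedPhrase → Spec_createCloud cleanedPhrase (createCloud cleanedPhrase)

-- ===== LEMMAS AND PROOFS =====

-- A's branching step is the unconditional counter step (both branches insert getD+1).
theorem createCloud_step_eq :
    (fun (cloud : PySem.Dict String Int) (word : String) =>
      if cloud.contains word then cloud.insert word (cloud.getD word 0 + 1)
      else cloud.insert word 1)
    = (fun cloud word => cloud.insert word (cloud.getD word 0 + 1)) := by
  funext cloud word
  by_cases h : cloud.contains word = true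
  · simp [h]
  · simp only [Bool.not_eq_true] at h
    rw [PySem.Dict.getD_of_not_contains]
    · simp
    · exact h

-- ===== VERDICT (by name: the statement is the Claim_ definition above) =====
theorem createCloud_spec : Claim_equal_createCloud := by
  intro xs _
  show createCloud xs = createCloud_alt xs
  unfold createCloud createCloud_alt
  rw [createCloud_step_eq, PySem.Dict.foldl_insert_getD_add_one_eq_counter,
      PySem.Dict.items_counter, PySem.List.dedup_eq_ofList]
  simp [PySem.List.count_eq]
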